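-- pv_equiv track=rewrite | github.com/srbcheema1/srb_VRP | src/util.py | combine_histories
-- ===== SOURCE A (Python) =====
-- def combine_histories(clusters_history):
-- 	combined_history = [] # combined of all clusters
-- 	for frame_no in range(max([len(history) for history in clusters_history])): # frames as longest history
-- 		frame = []
-- 		for cluster_history in clusters_history:
-- 			if(frame_no < len(cluster_history)):
-- 				frame.extend(cluster_history[frame_no])
-- 			else:
-- 				frame.extend(cluster_history[-1])
-- 		combined_history.append(frame)
-- 	return combined_history
-- ===== SOURCE B (Python) =====
-- def combine_histories(clusters_history):
--     # Incremental merge: one left-to-right pass over clusters, growing the frame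
--     # table as longer histories arrive; `tail` holds the concatenated last frames
--     # of all clusters processed so far (what they contribute beyond their length).
--     frames = []
--     tail = []
--     for h in clusters_history:
--         frames = [f + (h[i] if i < len(h) else h[-1]) for i, f in enumerate(frames)]
--         frames += [tail + elem for elem in h[len(frames):]]
--         if h:
--             tail = tail + h[-1]
--     return frames
-- ===== Notes on version B (the rewrite author's own statement) =====
-- stated objective: alternative
-- what changed: Instead of A's outer loop over frame indices up to a precomputed max length with an inner scan of all clusters, B makes a single left-to-right pass over the clusters, merging each history into the accumulated frame table and maintaining a running tail of the last frames of the clusters seen so far; no max length is ever computed.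
import Mathlib
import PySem

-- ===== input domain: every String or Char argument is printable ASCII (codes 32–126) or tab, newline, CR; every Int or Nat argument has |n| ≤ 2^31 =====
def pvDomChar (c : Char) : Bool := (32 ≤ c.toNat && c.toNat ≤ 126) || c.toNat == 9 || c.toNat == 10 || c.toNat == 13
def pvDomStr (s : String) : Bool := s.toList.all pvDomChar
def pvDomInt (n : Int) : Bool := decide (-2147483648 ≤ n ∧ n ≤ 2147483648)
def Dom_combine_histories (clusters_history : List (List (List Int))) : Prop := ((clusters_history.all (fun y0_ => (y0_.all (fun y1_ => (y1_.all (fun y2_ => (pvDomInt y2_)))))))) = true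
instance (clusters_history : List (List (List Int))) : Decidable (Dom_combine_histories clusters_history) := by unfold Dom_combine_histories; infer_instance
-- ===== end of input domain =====

-- B replaces A's per-frame scan over all clusters (with a precomputed max length) by a single
-- left-to-right fold over the clusters that merges each history into the accumulated frame table,
-- keeping a running `tail` of the last frames of the clusters seen so far. Return value only;
-- neither program mutates its argument.

-- ===== PORT A =====
-- max([len(history) for history in clusters_history]); none (ValueError on []) excluded by Pre_
def pyMaxLen (clusters_history : List (List (List Int))) : Int :=
  (PySem.List.max? (clusters_history.map (fun h => (h.length : Int))) (fun x => x)).getD 0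

def combine_histories (clusters_history : List (List (List Int))) : List (List Int) :=
  (PySem.List.pyRange 0 (pyMaxLen clusters_history) 1).foldl
    (fun combined_history frame_no =>
      combined_history ++
        [clusters_history.foldl
          (fun frame cluster_history =>
            frame ++ (if frame_no < (cluster_history.length : Int)
                      then (PySem.List.pyGet? cluster_history frame_no).getD []   -- none = IndexError, unreachable here
                      else (PySem.List.pyGet? cluster_history (-1)).getD []))     -- none = IndexError, excluded by Pre_
          []])
    []

-- ===== PORT B =====
-- the body of B's for-loop: merge one history into (frames, tail)
def altStep (st : List (List Int) × List Int) (h : List (List Int)) :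
    List (List Int) × List Int :=
  let frames := (PySem.List.enumerate st.1 0).map (fun p =>
      p.2 ++ (if p.1 < (h.length : Int)
              then (PySem.List.pyGet? h p.1).getD []       -- none = IndexError, unreachable here
              else (PySem.List.pyGet? h (-1)).getD []))    -- none = IndexError, excluded by Pre_
  let frames2 := frames ++
      (PySem.List.slice h (some (frames.length : Int)) none).map (fun elem => st.2 ++ elem)
  (frames2, if h ≠ [] then st.2 ++ (PySem.List.pyGet? h (-1)).getD [] else st.2)

def combine_histories_alt (clusters_history : List (List (List Int))) : List (List Int) :=
  (clusters_history.foldl altStep ([], [])).1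

-- ===== PRECONDITION & SPEC =====
-- A raises ValueError on the empty list (max of nothing) and IndexError ([-1] on an empty
-- history) when some history is empty while another is not; exactly those are excluded.
def Pre_combine_histories (clusters_history : List (List (List Int))) : Prop :=
  clusters_history ≠ [] ∧
    ((∀ h ∈ clusters_history, h ≠ []) ∨ (∀ h ∈ clusters_history, h = []))
instance (clusters_history : List (List (List Int))) : Decidable (Pre_combine_histories clusters_history) := by unfold Pre_combine_histories; infer_instance
def pvWitness_combine_histories : List (List (List Int)) := [[[1], [2, 3]], [[4]]]

def Spec_combine_histories (clusters_history : List (List (List Int))) (out : List (List Int)) : Prop := out = combine_histories_alt clusters_history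
instance (clusters_history : List (List (List Int))) (out : List (List Int)) : Decidable (Spec_combine_histories clusters_history out) := by unfold Spec_combine_histories; infer_instance

-- ===== CLAIM (what is proved, stated in full; the proofs are below) =====
def Claim_equal_combine_histories : Prop := ∀ (clusters_history : List (List (List Int))), Dom_combine_histories clusters_history → Pre_combine_histories clusters_history → Spec_combine_histories clusters_history (combine_histories clusters_history)

-- ===== LEMMAS AND PROOFS =====

-- a cluster's contribution to frame k (the expression both ports compute)
def colB (k : Nat) (h : List (List Int)) : List Int :=
  if (k : Int) < (h.length : Int) then (PySem.List.pyGet? h (k : Int)).getD []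
  else (PySem.List.pyGet? h (-1)).getD []

def lastD (h : List (List Int)) : List Int := (PySem.List.pyGet? h (-1)).getD []

def maxNat (ch : List (List (List Int))) : Nat := ch.foldl (fun m h => max m h.length) 0

lemma le_foldl_max_seed (ch : List (List (List Int))) (s : Nat) :
    s ≤ ch.foldl (fun m h => max m h.length) s := by
  induction ch generalizing s with
  | nil => simp
  | cons a t ih => exact le_trans (le_max_left _ _) (ih _)

lemma foldl_max_mem_le (ch : List (List (List Int))) (s : Nat) (h : List (List Int))
    (hm : h ∈ ch) : h.length ≤ ch.foldl (fun m h => max m h.length) s := by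
  induction ch generalizing s with
  | nil => cases hm
  | cons a t ih =>
    simp only [List.foldl_cons]
    rcases List.mem_cons.mp hm with rfl | hm
    · exact le_trans (le_max_right _ _) (le_foldl_max_seed t _)
    · exact ih _ hm

lemma foldl_max_le (ch : List (List (List Int))) (s b : Nat) (hs : s ≤ b)
    (hub : ∀ h ∈ ch, h.length ≤ b) : ch.foldl (fun m h => max m h.length) s ≤ b := by
  induction ch generalizing s with
  | nil => simpa using hs
  | cons a t ih =>
    simp only [List.mem_cons, forall_eq_or_imp] at hub
    simp only [List.foldl_cons]
    exact ih _ (max_le hs hub.1) hub.2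

lemma maxNat_ub (ch : List (List (List Int))) (h : List (List Int)) (hm : h ∈ ch) :
    h.length ≤ maxNat ch := foldl_max_mem_le ch 0 h hm

lemma pyMaxLen_toNat (ch : List (List (List Int))) : (pyMaxLen ch).toNat = maxNat ch := by
  unfold pyMaxLen
  cases hm : PySem.List.max? (ch.map (fun h => (h.length : Int))) (fun x => x) with
  | none =>
    rw [PySem.List.max?_eq_none_iff, List.map_eq_nil_iff] at hm
    subst hm; rfl
  | some M =>
    have hmem := PySem.List.max?_mem hm
    have hub := PySem.List.max?_isMax hm
    simp only [List.mem_map] at hmem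
    obtain ⟨h0, hh0, rfl⟩ := hmem
    simp only [Option.getD_some, Int.toNat_natCast]
    refine le_antisymm (maxNat_ub ch h0 hh0) (foldl_max_le ch 0 h0.length (Nat.zero_le _) ?_)
    intro h hh
    have := hub (h.length : Int) (List.mem_map_of_mem hh)
    exact_mod_cast this

lemma enum_map_range {β : Type} (m : Nat) (f : Nat → β) :
    PySem.List.enumerate ((List.range m).map f) 0 =
      (List.range m).map (fun (k : Nat) => ((k : Int), f k)) := by
  induction m with
  | zero => simp [PySem.List.enumerate_nil]
  | succ m ih =>
    rw [List.range_succ, List.map_append, PySem.List.enumerate_append, ih, List.map_append]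
    simp [PySem.List.enumerate_cons, PySem.List.enumerate_nil]

lemma drop_eq_map_range {β : Type} [Inhabited β] (h : List β) (m : Nat) :
    h.drop m = (List.range (h.length - m)).map (fun j => h.getD (m + j) default) := by
  refine List.ext_getElem (by simp) ?_
  intro i h1 h2
  simp only [List.getElem_drop, List.getElem_map, List.getElem_range]
  simp only [List.length_drop] at h1
  rw [List.getD_eq_getElem _ _ (by omega)]

lemma colB_eq_lastD (k : Nat) (h : List (List Int)) (hk : h.length ≤ k) :
    colB k h = lastD h := by
  unfold colB lastD
  rw [if_neg (by exact_mod_cast Nat.not_lt.mpr hk)]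

lemma colB_eq_getD (k : Nat) (h : List (List Int)) (hk : k < h.length) :
    colB k h = h.getD k [] := by
  unfold colB
  rw [if_pos (by exact_mod_cast hk), PySem.List.pyGet?_natCast, List.getD_eq_getElem?_getD]

lemma altStep_inv (q : List (List (List Int))) (h : List (List Int)) :
    altStep ((List.range (maxNat q)).map (fun k => (q.map (colB k)).flatten),
             (q.map lastD).flatten) h =
      ((List.range (maxNat (q ++ [h]))).map (fun k => ((q ++ [h]).map (colB k)).flatten),
       ((q ++ [h]).map lastD).flatten) := by
  have hmax : maxNat (q ++ [h]) = max (maxNat q) h.length := by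
    simp [maxNat, List.foldl_append]
  set m := maxNat q with hm
  simp only [altStep, enum_map_range, List.map_map]
  have hcomp : ((fun p : Int × List Int => p.2 ++
        (if p.1 < (h.length : Int) then (PySem.List.pyGet? h p.1).getD []
         else (PySem.List.pyGet? h (-1)).getD [])) ∘
        (fun k : Nat => ((k : Int), (q.map (colB k)).flatten))) =
      fun k : Nat => (q.map (colB k)).flatten ++ colB k h := rfl
  rw [hcomp]
  refine Prod.ext ?_ ?_
  · -- the frame table
    simp only [List.length_map, List.length_range]
    rw [PySem.List.slice_from_natCast, drop_eq_map_range, hmax,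
      show max m h.length = m + (max m h.length - m) by omega, List.range_add,
      List.map_append, List.map_map]
    refine congrArg₂ (· ++ ·) ?_ ?_
    · refine List.map_congr_left fun k _ => ?_
      simp [List.flatten_append]
    · rw [show max m h.length - m = h.length - m by omega, List.map_map]
      refine List.map_congr_left fun j hj => ?_
      rw [List.mem_range] at hj
      have hlt : m + j < h.length := by omega
      simp only [Function.comp_apply, List.map_append, List.flatten_append]
      have hT : (q.map (colB (m + j))).flatten = (q.map lastD).flatten := by
        refine congrArg List.flatten (List.map_congr_left fun h' hh' => ?_)
        exact colB_eq_lastD _ _ (le_trans (maxNat_ub q h' hh') (by omega))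
      rw [hT]
      simp only [List.map_cons, List.map_nil, List.flatten_cons, List.flatten_nil,
        List.append_nil, colB_eq_getD _ _ hlt]
      rfl
  · -- the tail
    by_cases hh : h = []
    · subst hh
      simp [lastD, PySem.List.pyGet?]
    · simp [hh, lastD, List.flatten_append]

lemma alt_fold (p : List (List (List Int))) :
    p.foldl altStep ([], []) =
      ((List.range (maxNat p)).map (fun k => (p.map (colB k)).flatten),
       (p.map lastD).flatten) := by
  induction p using List.reverseRecOn with
  | nil => rfl
  | append_singleton q h ih =>
    rw [List.foldl_append, List.foldl_cons, List.foldl_nil, ih, altStep_inv]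

lemma repA (ch : List (List (List Int))) :
    combine_histories ch =
      (List.range (pyMaxLen ch).toNat).map (fun k => (ch.map (colB k)).flatten) := by
  unfold combine_histories
  rw [PySem.List.pyRange_one, List.foldl_map, PySem.List.foldl_append_singleton_eq_map]
  simp only [Int.sub_zero, zero_add, List.nil_append]
  refine List.map_congr_left fun k _ => ?_
  rw [PySem.List.foldl_append_eq_flatMap]
  simp only [List.nil_append]
  rw [List.flatMap_def]
  rfl

-- ===== VERDICT (by name: the statement is the Claim_ definition above) =====
theorem combine_histories_spec : Claim_equal_combine_histories := by
  intro ch _ _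
  unfold Spec_combine_histories combine_histories_alt
  rw [repA, alt_fold, pyMaxLen_toNat]
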